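-- pv_equiv track=rewrite | github.com/coala/coala-bears | bears/python/PyImportSortBear.py | _seperate_imports
-- ===== SOURCE A (Python) =====
-- def _seperate_imports(file):
--     import_stmts = []
--     tmp = []
--     paren = False
--     for lineno, lines in enumerate(file, start=1):
--         if 'import' in lines.split() or paren:
--             # To ensure that
--             # from x import ( y,
--             #                 z) type of imports are not treated as
--             # different sections
--             if '(' in lines and ')' not in lines:
--                 paren = True
--             if ')' in lines:
--                 paren = False
--             tmp.append((lineno, lines))
--         else:
--             if tmp:
--                 import_stmts.append(tmp)
--             tmp = []
--     # To ensure that if the last line of a file is an import statement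
--     # it doesn't get ignored
--     if tmp:
--         import_stmts.append(tmp)
--         tmp = []
--     return import_stmts
-- ===== SOURCE B (Python) =====
-- def _group(flagged):
--     # flagged: list of (flag, (lineno, line)); split into maximal runs of equal
--     # flag, keep only the True runs.
--     groups = []
--     i = 0
--     n = len(flagged)
--     while i < n:
--         flag = flagged[i][0]
--         j = i + 1
--         while j < n and flagged[j][0] == flag:
--             j += 1
--         if flag:
--             groups.append([item for _, item in flagged[i:j]])
--         i = j
--     return groups
--
--
-- def _seperate_imports(file):
--     # Pass 1: flag each line as belonging to an import section or not,
--     # tracking the parenthesis-continuation state.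
--     flagged = []
--     paren = False
--     for lineno, lines in enumerate(file, start=1):
--         if 'import' in lines.split() or paren:
--             if '(' in lines and ')' not in lines:
--                 paren = True
--             if ')' in lines:
--                 paren = False
--             flagged.append((True, (lineno, lines)))
--         else:
--             flagged.append((False, (lineno, lines)))
--     # Pass 2: group consecutive equally-flagged lines, keep the import runs.
--     return _group(flagged)
-- ===== Notes on version B (the rewrite author's own statement) =====
-- stated objective: alternative
-- what changed: B separates the single stateful loop (accumulating the current section and flushing it on boundaries, plus a trailing flush) into two passes: one that only flags each line as import-section or not while tracking the paren state, and a recursive run-grouping pass that keeps the True runs.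
import Mathlib
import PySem

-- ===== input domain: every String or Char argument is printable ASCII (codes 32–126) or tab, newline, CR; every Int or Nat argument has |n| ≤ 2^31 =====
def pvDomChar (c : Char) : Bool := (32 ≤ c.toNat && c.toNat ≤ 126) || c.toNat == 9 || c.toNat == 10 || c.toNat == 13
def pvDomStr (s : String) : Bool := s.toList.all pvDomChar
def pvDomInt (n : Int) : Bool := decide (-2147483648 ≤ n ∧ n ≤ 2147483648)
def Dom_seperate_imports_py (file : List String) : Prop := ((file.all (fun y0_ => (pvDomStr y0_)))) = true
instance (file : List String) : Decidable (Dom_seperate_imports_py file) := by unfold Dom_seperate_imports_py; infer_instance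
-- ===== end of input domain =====

-- B separates A's single flush-on-boundary loop into a flagging pass plus a run-grouping pass.

-- 'import' in lines.split() or paren
def pvIsImp (lines : String) (paren : Bool) : Bool :=
  (PySem.Str.split₀ lines).contains "import" || paren

-- the two paren updates, in A's (and B's) order
def pvParenNext (lines : String) (paren : Bool) : Bool :=
  let paren := if PySem.Str.isIn "(" lines && !(PySem.Str.isIn ")" lines) then true else paren
  if PySem.Str.isIn ")" lines then false else paren

-- ===== PORT A =====
-- loop body of A's for-loop, state = (import_stmts, tmp, paren)
def pvStepA (st : List (List (Int × String)) × List (Int × String) × Bool)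
    (p : Int × String) : List (List (Int × String)) × List (Int × String) × Bool :=
  if pvIsImp p.2 st.2.2 then
    (st.1, st.2.1 ++ [p], pvParenNext p.2 st.2.2)
  else
    if st.2.1 ≠ [] then (st.1 ++ [st.2.1], [], st.2.2) else (st.1, [], st.2.2)

-- A's trailing 'if tmp: import_stmts.append(tmp)'
def pvFinishA (st : List (List (Int × String)) × List (Int × String) × Bool) :
    List (List (Int × String)) :=
  if st.2.1 ≠ [] then st.1 ++ [st.2.1] else st.1

def seperate_imports_py (file : List String) : List (List (Int × String)) :=
  pvFinishA ((PySem.List.enumerate file 1).foldl pvStepA ([], [], false))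

-- ===== PORT B =====
-- B's helper _group: split into maximal runs of equal flag, keep the True runs
def pvGroup : List (Bool × (Int × String)) → List (List (Int × String))
  | [] => []
  | (f, x) :: rest =>
    let tail := pvGroup (rest.dropWhile (fun p => p.1 == f))
    if f then (x :: (rest.takeWhile (fun p => p.1 == f)).map (·.2)) :: tail else tail
  termination_by l => l.length
  decreasing_by
    exact Nat.lt_succ_of_le (List.length_dropWhile_le _ _)

-- loop body of B's flagging pass, state = (flagged, paren)
def pvStepB (acc : List (Bool × (Int × String)) × Bool)
    (p : Int × String) : List (Bool × (Int × String)) × Bool :=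
  if pvIsImp p.2 acc.2 then
    (acc.1 ++ [(true, p)], pvParenNext p.2 acc.2)
  else
    (acc.1 ++ [(false, p)], acc.2)

def seperate_imports_py_alt (file : List String) : List (List (Int × String)) :=
  pvGroup (((PySem.List.enumerate file 1).foldl pvStepB ([], false)).1)

-- ===== PRECONDITION & SPEC =====
def Spec_seperate_imports_py (file : List String) (out : List (List (Int × String))) : Prop := out = seperate_imports_py_alt file
instance (file : List String) (out : List (List (Int × String))) : Decidable (Spec_seperate_imports_py file out) := by unfold Spec_seperate_imports_py; infer_instance

-- ===== CLAIM (what is proved, stated in full; the proofs are below) =====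
def Claim_equal_seperate_imports_py : Prop := ∀ (file : List String), Dom_seperate_imports_py file → Spec_seperate_imports_py file (seperate_imports_py file)

-- ===== LEMMAS AND PROOFS =====

-- common recursive specification of the scan over the enumerated lines
def pvSpecGo (paren : Bool) (tmp : List (Int × String)) : List (Int × String) → List (List (Int × String))
  | [] => if tmp ≠ [] then [tmp] else []
  | p :: rest =>
    if pvIsImp p.2 paren then
      pvSpecGo (pvParenNext p.2 paren) (tmp ++ [p]) rest
    else
      (if tmp ≠ [] then [tmp] else []) ++ pvSpecGo paren [] rest

-- B's flag list, as a cons-recursion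
def pvFlagsGo (paren : Bool) : List (Int × String) → List (Bool × (Int × String))
  | [] => []
  | p :: rest =>
    if pvIsImp p.2 paren then (true, p) :: pvFlagsGo (pvParenNext p.2 paren) rest
    else (false, p) :: pvFlagsGo paren rest

-- grouping with a pending (possibly empty) open run prefix
def pvA (tmp : List (Int × String)) (fl : List (Bool × (Int × String))) : List (List (Int × String)) :=
  if tmp = [] then pvGroup fl
  else match fl with
    | (true, _) :: _ =>
      match pvGroup fl with
      | g :: gs => (tmp ++ g) :: gs
      | [] => [tmp]
    | _ => tmp :: pvGroup fl

theorem pvGroup_nil : pvGroup [] = [] := by rw [pvGroup]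

theorem pvGroup_cons (f : Bool) (x : Int × String) (rest : List (Bool × (Int × String))) :
    pvGroup ((f, x) :: rest) =
      if f then (x :: (rest.takeWhile (fun p => p.1 == f)).map (·.2)) ::
        pvGroup (rest.dropWhile (fun p => p.1 == f))
      else pvGroup (rest.dropWhile (fun p => p.1 == f)) := by
  rw [pvGroup]

theorem pvGroup_false (x : Int × String) (fl : List (Bool × (Int × String))) :
    pvGroup ((false, x) :: fl) = pvGroup fl := by
  have h : ∀ fl : List (Bool × (Int × String)),
      pvGroup (fl.dropWhile (fun p => p.1 == false)) = pvGroup fl := by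
    intro fl
    induction fl with
    | nil => rfl
    | cons q r ih =>
      obtain ⟨b, y⟩ := q
      cases b with
      | false =>
        rw [List.dropWhile_cons_of_pos (by rfl), ih, pvGroup_cons]
        simp only [Bool.false_eq_true, ite_false]
        rw [ih]
      | true => rw [List.dropWhile_cons_of_neg (by simp)]
  rw [pvGroup_cons]
  simp only [Bool.false_eq_true, ite_false]
  rw [h fl]

theorem pvA_true (tmp : List (Int × String)) (x : Int × String)
    (fl : List (Bool × (Int × String))) :
    pvA tmp ((true, x) :: fl) = pvA (tmp ++ [x]) fl := by
  have hgrp : pvGroup ((true, x) :: fl) =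
      (x :: (fl.takeWhile (fun p => p.1 == true)).map (·.2)) ::
        pvGroup (fl.dropWhile (fun p => p.1 == true)) := by
    rw [pvGroup_cons]; rfl
  have hne : tmp ++ [x] ≠ [] := by simp
  cases fl with
  | nil =>
    unfold pvA
    rw [hgrp]
    simp only [List.takeWhile_nil, List.dropWhile_nil, List.map_nil, pvGroup_nil, if_neg hne]
    split_ifs with h
    · subst h; rfl
    · rfl
  | cons q r =>
    obtain ⟨b, y⟩ := q
    cases b with
    | true =>
      have hgrp2 : pvGroup ((true, y) :: r) =
          (y :: (r.takeWhile (fun p => p.1 == true)).map (·.2)) ::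
            pvGroup (r.dropWhile (fun p => p.1 == true)) := by
        rw [pvGroup_cons]; rfl
      unfold pvA
      rw [hgrp, if_neg hne]
      rw [List.takeWhile_cons_of_pos (by rfl), List.dropWhile_cons_of_pos (by rfl)]
      rw [hgrp2]
      split_ifs with h
      · subst h; simp
      · simp
    | false =>
      unfold pvA
      rw [hgrp, if_neg hne]
      rw [List.takeWhile_cons_of_neg (by simp), List.dropWhile_cons_of_neg (by simp)]
      split_ifs with h
      · subst h; simp
      · simp

theorem pvA_false (tmp : List (Int × String)) (x : Int × String)
    (fl : List (Bool × (Int × String))) :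
    pvA tmp ((false, x) :: fl) = (if tmp ≠ [] then [tmp] else []) ++ pvA [] fl := by
  rcases eq_or_ne tmp [] with h | h
  · subst h
    simp only [pvA, ne_eq, not_true_eq_false, ite_false, List.nil_append, pvGroup_false]
    simp
  · have h1 : pvA tmp ((false, x) :: fl) = tmp :: pvGroup ((false, x) :: fl) := by
      unfold pvA; rw [if_neg h]
    rw [h1, pvGroup_false, if_pos h]
    show tmp :: pvGroup fl = [tmp] ++ (if ([] : List (Int × String)) = [] then pvGroup fl else _)
    rw [if_pos rfl]
    rfl

theorem pvSpecGo_eq_pvA (l : List (Int × String)) :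
    ∀ (paren : Bool) (tmp : List (Int × String)),
      pvSpecGo paren tmp l = pvA tmp (pvFlagsGo paren l) := by
  induction l with
  | nil =>
    intro paren tmp
    rcases eq_or_ne tmp [] with h | h
    · subst h
      simp [pvSpecGo, pvFlagsGo, pvA, pvGroup_nil]
    · show (if tmp ≠ [] then [tmp] else []) = pvA tmp (pvFlagsGo paren [])
      rw [if_pos h]
      show [tmp] = pvA tmp []
      unfold pvA
      rw [if_neg h]
      show [tmp] = tmp :: pvGroup []
      rw [pvGroup_nil]
  | cons p rest ih =>
    intro paren tmp
    simp only [pvSpecGo, pvFlagsGo]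
    by_cases h : pvIsImp p.2 paren = true
    · rw [if_pos h, if_pos h, ih, pvA_true]
    · rw [if_neg h, if_neg h, ih, pvA_false]

-- characterisation of A's foldl with general state
theorem foldlA_eq (l : List (Int × String)) :
    ∀ (stmts : List (List (Int × String))) (tmp : List (Int × String)) (paren : Bool),
      pvFinishA (l.foldl pvStepA (stmts, tmp, paren)) = stmts ++ pvSpecGo paren tmp l := by
  induction l with
  | nil =>
    intro stmts tmp paren
    simp only [List.foldl_nil, pvFinishA, pvSpecGo]
    split_ifs <;> simp
  | cons p rest ih =>
    intro stmts tmp paren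
    simp only [List.foldl_cons, pvSpecGo, pvStepA]
    by_cases h : pvIsImp p.2 paren = true
    · rw [if_pos h, if_pos h, ih]
    · rw [if_neg h, if_neg h]
      by_cases ht : tmp = []
      · simp only [ht, ne_eq, not_true_eq_false, ite_false, ih,
          List.nil_append]
      · simp only [ne_eq, ht, not_false_eq_true, ite_true, ih, List.append_assoc]

-- characterisation of B's foldl with general state
theorem foldlB_eq (l : List (Int × String)) :
    ∀ (acc : List (Bool × (Int × String))) (paren : Bool),
      (l.foldl pvStepB (acc, paren)).1 = acc ++ pvFlagsGo paren l := by
  induction l with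
  | nil => intro acc paren; simp [pvFlagsGo]
  | cons p rest ih =>
    intro acc paren
    simp only [List.foldl_cons, pvFlagsGo, pvStepB]
    by_cases h : pvIsImp p.2 paren = true
    · rw [if_pos h, if_pos h, ih]; simp
    · rw [if_neg h, if_neg h, ih]; simp

-- ===== VERDICT (by name: the statement is the Claim_ definition above) =====
theorem seperate_imports_py_spec : Claim_equal_seperate_imports_py := by
  intro file _
  show seperate_imports_py file = seperate_imports_py_alt file
  unfold seperate_imports_py seperate_imports_py_alt
  rw [foldlA_eq, foldlB_eq, pvSpecGo_eq_pvA]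
  simp [pvA]
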